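-- pv_equiv track=rewrite | github.com/Joselillo2004/Extractor_Snippets | src/snippets/agents/context_builder.py | _extract_minimal_definition
-- ===== SOURCE A (Python) =====
-- def _extract_minimal_definition(full_definition: str, needed_name: str) -> str:
--     """
--     Extrae la definición mínima necesaria de un bloque de código
--
--     Args:
--         full_definition: Definición completa (puede ser multi-línea)
--         needed_name: Nombre específico que se necesita
--
--     Returns:
--         Definición mínima extraída
--     """
--     lines = full_definition.strip().split('\n')
--
--     # Para definiciones simples de variables
--     for line in lines:
--         line = line.strip()
--         if line.startswith(f'{needed_name} ='):
--             return line
--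
--     # Para funciones y clases, incluir toda la definición
--     if any(line.strip().startswith(('def ', 'class ')) for line in lines):
--         return full_definition
--
--     # Por defecto, retornar la primera línea relevante
--     for line in lines:
--         line = line.strip()
--         if line and not line.startswith('#'):
--             if needed_name in line:
--                 return line
--
--     return full_definition
-- ===== SOURCE B (Python) =====
-- def _extract_minimal_definition(full_definition: str, needed_name: str) -> str:
--     # One pass over the stripped lines: return a var-assignment line at once,
--     # otherwise accumulate a def/class flag and the first relevant line, deciding at the end.
--     prefix = f'{needed_name} ='
--     has_def = False
--     first_relevant = None
--     for raw in full_definition.strip().split('\n'):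
--         line = raw.strip()
--         if line.startswith(prefix):
--             return line
--         if line.startswith(('def ', 'class ')):
--             has_def = True
--         if first_relevant is None and line and not line.startswith('#') and needed_name in line:
--             first_relevant = line
--     if has_def:
--         return full_definition
--     if first_relevant is not None:
--         return first_relevant
--     return full_definition
-- ===== Notes on version B (the rewrite author's own statement) =====
-- stated objective: simpler
-- what changed: Replaces A's three separate scans of the lines (var-assignment scan, any() def/class scan, relevant-line scan) with a single pass that early-returns on a var-assignment line while accumulating a def/class flag and the first relevant line, deciding once after the loop.
import Mathlib
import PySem

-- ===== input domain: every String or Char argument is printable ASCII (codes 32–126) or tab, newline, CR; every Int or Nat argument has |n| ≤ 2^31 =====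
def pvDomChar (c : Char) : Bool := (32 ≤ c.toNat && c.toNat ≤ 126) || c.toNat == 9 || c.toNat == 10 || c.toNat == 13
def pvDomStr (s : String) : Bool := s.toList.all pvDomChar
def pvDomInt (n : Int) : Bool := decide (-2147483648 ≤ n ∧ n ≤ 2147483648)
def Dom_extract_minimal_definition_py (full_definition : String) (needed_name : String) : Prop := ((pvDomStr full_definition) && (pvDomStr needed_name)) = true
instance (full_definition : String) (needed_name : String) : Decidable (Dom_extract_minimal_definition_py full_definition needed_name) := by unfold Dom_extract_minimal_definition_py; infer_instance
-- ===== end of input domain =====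

-- B merges A's three scans over the lines into one pass with two accumulators (simpler decomposition, same cost).

-- s.split('\n'): split? is none only for an empty separator, so getD [] is exact here
def pvSplitNL (s : String) : List String := (PySem.Str.split? s "\n").getD []

-- shared line predicates (direct transcriptions of the Python tests)
def pvIsDefLine (s : String) : Bool :=
  PySem.Str.startswith s "def " || PySem.Str.startswith s "class "

def pvIsRelLine (needed s : String) : Bool :=
  !(s == "") && !PySem.Str.startswith s "#" && PySem.Str.isIn needed s

-- ===== PORT A =====
-- first for-loop: return the first stripped line starting with f'{needed_name} ='
def pvALoop1 (needed : String) : List String → Option String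
  | [] => none
  | l :: rest =>
    if PySem.Str.startswith (PySem.Str.strip l) (needed ++ " =") then some (PySem.Str.strip l)
    else pvALoop1 needed rest

-- last for-loop: first nonempty non-comment stripped line containing needed_name
def pvALoop2 (needed : String) : List String → Option String
  | [] => none
  | l :: rest =>
    if pvIsRelLine needed (PySem.Str.strip l) then some (PySem.Str.strip l)
    else pvALoop2 needed rest

def extract_minimal_definition_py (full_definition : String) (needed_name : String) : String :=
  let lines := pvSplitNL (PySem.Str.strip full_definition)
  match pvALoop1 needed_name lines with
  | some l => l
  | none =>
    if lines.any (fun l => pvIsDefLine (PySem.Str.strip l)) then full_definition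
    else
      match pvALoop2 needed_name lines with
      | some l => l
      | none => full_definition

-- ===== PORT B =====
-- single pass carrying has_def and first_relevant; early return on a var-assignment line
def pvBLoop (full needed : String) : List String → Bool → Option String → String
  | [], hasDef, firstRel => if hasDef then full else firstRel.getD full
  | l :: rest, hasDef, firstRel =>
    if PySem.Str.startswith (PySem.Str.strip l) (needed ++ " =") then PySem.Str.strip l
    else
      pvBLoop full needed rest (hasDef || pvIsDefLine (PySem.Str.strip l))
        (match firstRel with
         | some r => some r
         | none =>
           if pvIsRelLine needed (PySem.Str.strip l) then some (PySem.Str.strip l) else none)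

def extract_minimal_definition_py_alt (full_definition : String) (needed_name : String) : String :=
  pvBLoop full_definition needed_name (pvSplitNL (PySem.Str.strip full_definition)) false none

-- ===== PRECONDITION & SPEC =====
def Spec_extract_minimal_definition_py (full_definition : String) (needed_name : String) (out : String) : Prop := out = extract_minimal_definition_py_alt full_definition needed_name
instance (full_definition : String) (needed_name : String) (out : String) : Decidable (Spec_extract_minimal_definition_py full_definition needed_name out) := by unfold Spec_extract_minimal_definition_py; infer_instance

-- ===== CLAIM (what is proved, stated in full; the proofs are below) =====
def Claim_equal_extract_minimal_definition_py : Prop := ∀ (full_definition : String) (needed_name : String), Dom_extract_minimal_definition_py full_definition needed_name → Spec_extract_minimal_definition_py full_definition needed_name (extract_minimal_definition_py full_definition needed_name)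

-- ===== LEMMAS AND PROOFS =====

-- the one-pass loop computes A's three-scan decision, for any accumulator state
lemma pvBLoop_eq (full needed : String) (lines : List String) (hasDef : Bool) (firstRel : Option String) :
    pvBLoop full needed lines hasDef firstRel =
      match pvALoop1 needed lines with
      | some l => l
      | none =>
        if hasDef || lines.any (fun l => pvIsDefLine (PySem.Str.strip l)) then full
        else
          match firstRel with
          | some r => r
          | none => (pvALoop2 needed lines).getD full := by
  induction lines generalizing hasDef firstRel with
  | nil =>
    cases hasDef <;> cases firstRel <;> simp [pvBLoop, pvALoop1, pvALoop2]
  | cons l rest ih =>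
    simp only [pvBLoop, pvALoop1]
    by_cases h1 : PySem.Str.startswith (PySem.Str.strip l) (needed ++ " =") = true
    · simp only [h1, ite_true]
    · simp only [h1, ite_false, Bool.false_eq_true, ih]
      by_cases h2 : pvIsDefLine (PySem.Str.strip l) = true
      · simp only [List.any_cons, h2, Bool.true_or, Bool.or_true, ite_true]
      · simp only [List.any_cons, h2, Bool.or_false, Bool.false_or]
        cases hL : pvALoop1 needed rest with
        | some v => rfl
        | none =>
          by_cases hA : (hasDef || rest.any fun l => pvIsDefLine (PySem.Str.strip l)) = true
          · simp [hA]
          · simp only [Bool.not_eq_true] at hA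
            simp only [hA, Bool.false_eq_true, if_false]
            cases firstRel with
            | some r => rfl
            | none =>
              simp only [pvALoop2]
              by_cases h3 : pvIsRelLine needed (PySem.Str.strip l) = true
              · simp [h3]
              · simp [h3]

theorem pv_main (full needed : String) :
    extract_minimal_definition_py full needed = extract_minimal_definition_py_alt full needed := by
  simp only [extract_minimal_definition_py, extract_minimal_definition_py_alt, pvBLoop_eq,
    Bool.false_or]
  generalize pvALoop1 needed (pvSplitNL (PySem.Str.strip full)) = o1
  generalize (pvSplitNL (PySem.Str.strip full)).any (fun l => pvIsDefLine (PySem.Str.strip l)) = b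
  generalize pvALoop2 needed (pvSplitNL (PySem.Str.strip full)) = o2
  cases o1 <;> cases b <;> cases o2 <;> rfl

-- ===== VERDICT (by name: the statement is the Claim_ definition above) =====
theorem extract_minimal_definition_py_spec : Claim_equal_extract_minimal_definition_py := by
  intro full needed _
  unfold Spec_extract_minimal_definition_py
  exact pv_main full needed
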